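-- pv_equiv track=rewrite | github.com/dpan538/Words-Over-Time | scripts/process_hub_chart02_routing.py | layer_for_term
-- ===== SOURCE A (Python) =====
-- from typing import Any
--
-- def layer_for_term(term: str, records: list[dict[str, Any]]) -> str:
--     lower = term.lower()
--     for record in records:
--         if record["query"].lower() == lower:
--             return record["routing_layer"]
--     if "spoke" in lower:
--         return "hub_and_spoke_model"
--     if any(word in lower for word in ["rail", "transit", "transport", "bus", "metro"]):
--         return "rail_transit_route"
--     if any(word in lower for word in ["airport", "airline", "shipping", "logistics", "distribution", "cargo", "freight"]):
--         return "air_logistics_route"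
--     if any(word in lower for word in ["network", "communication", "ethernet", "data", "digital", "usb", "server"]):
--         return "network_communication_route"
--     return "institutional_route_language"
-- ===== SOURCE B (Python) =====
-- _RANKED_KEYWORDS = [
--     ("spoke", 0),
--     ("rail", 1), ("transit", 1), ("transport", 1), ("bus", 1), ("metro", 1),
--     ("airport", 2), ("airline", 2), ("shipping", 2), ("logistics", 2),
--     ("distribution", 2), ("cargo", 2), ("freight", 2),
--     ("network", 3), ("communication", 3), ("ethernet", 3), ("data", 3),
--     ("digital", 3), ("usb", 3), ("server", 3),
-- ]
-- _LAYERS = [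
--     "hub_and_spoke_model",
--     "rail_transit_route",
--     "air_logistics_route",
--     "network_communication_route",
--     "institutional_route_language",
-- ]
--
-- def layer_for_term(term, records):
--     lower = term.lower()
--     # single accumulator pass over one flat ranked keyword table:
--     # keep the best (smallest) rank of any keyword occurring in the term
--     rank = len(_LAYERS) - 1
--     for word, r in _RANKED_KEYWORDS:
--         if r < rank and word in lower:
--             rank = r
--     for record in records:
--         if record["query"].lower() == lower:
--             return record["routing_layer"]
--     return _LAYERS[rank]
-- ===== Notes on version B (the rewrite author's own statement) =====
-- stated objective: alternative
-- what changed: Keyword categorisation is re-done as a single accumulator pass over one flat (keyword, rank) table computing the minimum rank present in the term (computed eagerly before the record scan) and indexing a layer list, instead of A's four sequential short-circuiting any() if-blocks after the scan.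
import Mathlib
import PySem

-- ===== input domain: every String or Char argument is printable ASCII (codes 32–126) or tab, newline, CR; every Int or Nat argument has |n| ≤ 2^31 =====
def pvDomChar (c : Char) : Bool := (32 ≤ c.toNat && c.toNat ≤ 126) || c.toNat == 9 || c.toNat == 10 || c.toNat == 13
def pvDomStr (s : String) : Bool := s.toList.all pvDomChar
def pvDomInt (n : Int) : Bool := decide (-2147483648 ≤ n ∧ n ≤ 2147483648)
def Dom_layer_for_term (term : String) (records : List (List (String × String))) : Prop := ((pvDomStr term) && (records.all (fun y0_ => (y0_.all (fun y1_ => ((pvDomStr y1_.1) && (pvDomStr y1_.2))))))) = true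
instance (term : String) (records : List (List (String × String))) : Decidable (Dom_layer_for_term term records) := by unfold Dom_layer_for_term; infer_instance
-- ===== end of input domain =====

-- B re-does the keyword categorisation as a single min-rank accumulator pass over one flat
-- (keyword, rank) table, computed eagerly before the record scan, indexing a layer list
-- (objective: alternative); equal return values proved on Pre_ (where A raises no KeyError).

-- ===== PORT A =====
-- the record scan with early return, then A's four keyword if-blocks
def pvLayerAuxA (lower : String) : List (List (String × String)) → String
  | [] =>
      if PySem.Str.isIn "spoke" lower then "hub_and_spoke_model"
      else if (["rail", "transit", "transport", "bus", "metro"]).any (fun w => PySem.Str.isIn w lower) then "rail_transit_route"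
      else if (["airport", "airline", "shipping", "logistics", "distribution", "cargo", "freight"]).any (fun w => PySem.Str.isIn w lower) then "air_logistics_route"
      else if (["network", "communication", "ethernet", "data", "digital", "usb", "server"]).any (fun w => PySem.Str.isIn w lower) then "network_communication_route"
      else "institutional_route_language"
  | r :: rs =>
      match (PySem.Dict.mk r).get? "query" with
      | none => ""  -- record["query"] raises KeyError here; excluded by Pre_
      | some q =>
          if PySem.Str.lower q == lower then
            match (PySem.Dict.mk r).get? "routing_layer" with
            | some v => v
            | none => ""  -- record["routing_layer"] raises KeyError here; excluded by Pre_
          else pvLayerAuxA lower rs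

def layer_for_term (term : String) (records : List (List (String × String))) : String :=
  pvLayerAuxA (PySem.Str.lower term) records

-- ===== PORT B =====
def pvRankedKeywords : List (String × Nat) :=
  [ ("spoke", 0),
    ("rail", 1), ("transit", 1), ("transport", 1), ("bus", 1), ("metro", 1),
    ("airport", 2), ("airline", 2), ("shipping", 2), ("logistics", 2),
    ("distribution", 2), ("cargo", 2), ("freight", 2),
    ("network", 3), ("communication", 3), ("ethernet", 3), ("data", 3),
    ("digital", 3), ("usb", 3), ("server", 3) ]

def pvLayers : List String :=
  [ "hub_and_spoke_model", "rail_transit_route", "air_logistics_route",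
    "network_communication_route", "institutional_route_language" ]

-- the 'for word, r in _RANKED_KEYWORDS' accumulator loop
def pvBestRank (lower : String) : Nat :=
  pvRankedKeywords.foldl
    (fun rank wr => if wr.2 < rank && PySem.Str.isIn wr.1 lower then wr.2 else rank)
    (pvLayers.length - 1)

-- the 'for record in records' loop with early return; nil => _LAYERS[rank]
-- (rank < pvLayers.length always, so getD is exact for Python's list index)
def pvScanB (lower : String) (rank : Nat) : List (List (String × String)) → String
  | [] => pvLayers.getD rank ""
  | r :: rs =>
      match (PySem.Dict.mk r).get? "query" with
      | none => ""  -- record["query"] raises KeyError here; excluded by Pre_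
      | some q =>
          if PySem.Str.lower q == lower then
            match (PySem.Dict.mk r).get? "routing_layer" with
            | some v => v
            | none => ""  -- record["routing_layer"] raises KeyError here; excluded by Pre_
          else pvScanB lower rank rs

def layer_for_term_alt (term : String) (records : List (List (String × String))) : String :=
  let lower := PySem.Str.lower term
  pvScanB lower (pvBestRank lower) records

-- ===== PRECONDITION & SPEC =====
-- whether A's scan stops at record r (record["query"].lower() == lower)
def pvQMatch (lower : String) (r : List (String × String)) : Bool :=
  match (PySem.Dict.mk r).get? "query" with
  | some q => PySem.Str.lower q == lower
  | none => false

-- Exactly the inputs where Python A returns (no KeyError): every record the scan visits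
-- (i.e. before any match) has key "query", and the first matching record has key "routing_layer".
def Pre_layer_for_term (term : String) (records : List (List (String × String))) : Prop :=
  ∀ i, (h : i < records.length) →
    (∀ j, (hj : j < records.length) → j < i → pvQMatch (PySem.Str.lower term) records[j] = false) →
    (((PySem.Dict.mk records[i]).get? "query").isSome = true ∧
      (pvQMatch (PySem.Str.lower term) records[i] = true →
        ((PySem.Dict.mk records[i]).get? "routing_layer").isSome = true))
instance (term : String) (records : List (List (String × String))) : Decidable (Pre_layer_for_term term records) := by unfold Pre_layer_for_term; infer_instance

def pvWitness_layer_for_term : String × (List (List (String × String))) :=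
  ("Spoke route", [[("query", "zz"), ("routing_layer", "L1")]])

def Spec_layer_for_term (term : String) (records : List (List (String × String))) (out : String) : Prop := out = layer_for_term_alt term records
instance (term : String) (records : List (List (String × String))) (out : String) : Decidable (Spec_layer_for_term term records out) := by unfold Spec_layer_for_term; infer_instance

-- ===== CLAIM (what is proved, stated in full; the proofs are below) =====
def Claim_equal_layer_for_term : Prop := ∀ (term : String) (records : List (List (String × String))), Dom_layer_for_term term records → Pre_layer_for_term term records → Spec_layer_for_term term records (layer_for_term term records)

-- ===== LEMMAS AND PROOFS =====
-- recursive restatement of Pre_ used only by the proofs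
def pvPreRec (lower : String) : List (List (String × String)) → Prop
  | [] => True
  | r :: rs =>
      ((PySem.Dict.mk r).get? "query").isSome = true ∧
      (pvQMatch lower r = true → ((PySem.Dict.mk r).get? "routing_layer").isSome = true) ∧
      (pvQMatch lower r = false → pvPreRec lower rs)

theorem pvPre_to_rec (term : String) (records : List (List (String × String)))
    (hp : Pre_layer_for_term term records) : pvPreRec (PySem.Str.lower term) records := by
  induction records with
  | nil => trivial
  | cons r rs ih =>
      have h0 := hp 0 (by simp) (by omega)
      refine ⟨h0.1, h0.2, fun hnm => ?_⟩
      apply ih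
      intro i hi hprev
      have := hp (i + 1) (by simpa using Nat.succ_lt_succ hi) ?_
      · simpa using this
      · intro j hj hji
        cases j with
        | zero => simpa using hnm
        | succ j' =>
            have := hprev j' (by simpa using Nat.lt_of_succ_lt_succ hj) (Nat.lt_of_succ_lt_succ hji)
            simpa using this

-- the min-rank fold over a constant-rank group of keywords (f abstract so simp keeps it opaque)
theorem pvFold_group (f : String → Bool) (ws : List String) (r acc : Nat) :
    (ws.map (fun w => (w, r))).foldl
        (fun rank wr => if wr.2 < rank && f wr.1 then wr.2 else rank) acc
      = if r < acc && ws.any f then r else acc := by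
  induction ws generalizing acc with
  | nil => simp
  | cons w ws ih =>
      rw [List.map_cons, List.foldl_cons, ih, List.any_cons]
      by_cases hw : f w = true <;> by_cases hr : r < acc <;>
        simp [hw, hr]

-- the flat ranked table is the four groups in order
theorem pvRanked_groups :
    pvRankedKeywords =
      (["spoke"].map (fun w => (w, 0)))
      ++ ((["rail", "transit", "transport", "bus", "metro"]).map (fun w => (w, 1)))
      ++ ((["airport", "airline", "shipping", "logistics", "distribution", "cargo", "freight"]).map (fun w => (w, 2)))
      ++ ((["network", "communication", "ethernet", "data", "digital", "usb", "server"]).map (fun w => (w, 3))) := rfl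

-- B's nil case equals A's four sequential if-blocks
theorem pvNil_eq (lower : String) :
    pvLayers.getD (pvBestRank lower) "" = pvLayerAuxA lower [] := by
  unfold pvBestRank pvLayerAuxA
  rw [pvRanked_groups, List.foldl_append, List.foldl_append, List.foldl_append,
      pvFold_group (fun w => PySem.Str.isIn w lower), pvFold_group (fun w => PySem.Str.isIn w lower),
      pvFold_group (fun w => PySem.Str.isIn w lower), pvFold_group (fun w => PySem.Str.isIn w lower),
      show ((["spoke"]).any (fun w => PySem.Str.isIn w lower)) = PySem.Str.isIn "spoke" lower by simp]
  generalize PySem.Str.isIn "spoke" lower = b0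
  generalize (["rail", "transit", "transport", "bus", "metro"]).any (fun w => PySem.Str.isIn w lower) = b1
  generalize (["airport", "airline", "shipping", "logistics", "distribution", "cargo", "freight"]).any (fun w => PySem.Str.isIn w lower) = b2
  generalize (["network", "communication", "ethernet", "data", "digital", "usb", "server"]).any (fun w => PySem.Str.isIn w lower) = b3
  cases b0 <;> cases b1 <;> cases b2 <;> cases b3 <;> rfl

-- the two record scans agree under Pre_
theorem pvScan_eq (lower : String) (records : List (List (String × String)))
    (hp : pvPreRec lower records) :
    pvLayerAuxA lower records = pvScanB lower (pvBestRank lower) records := by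
  induction records with
  | nil => exact (pvNil_eq lower).symm
  | cons r rs ih =>
      obtain ⟨hq, hrl, htail⟩ := hp
      obtain ⟨q, hqe⟩ := Option.isSome_iff_exists.mp hq
      by_cases hm : PySem.Str.lower q = lower
      · obtain ⟨v, hve⟩ := Option.isSome_iff_exists.mp (hrl (by simp [pvQMatch, hqe, hm]))
        simp [pvLayerAuxA, pvScanB, hqe, hm, hve]
      · rw [pvLayerAuxA, pvScanB, hqe]
        simp only [beq_iff_eq, hm, if_false]
        exact ih (htail (by simp [pvQMatch, hqe, hm]))

-- ===== VERDICT (by name: the statement is the Claim_ definition above) =====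
theorem layer_for_term_spec : Claim_equal_layer_for_term := by
  intro term records _ hp
  unfold Spec_layer_for_term layer_for_term layer_for_term_alt
  exact pvScan_eq (PySem.Str.lower term) records (pvPre_to_rec term records hp)
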